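-- pv_equiv track=rewrite | github.com/andrewhead/tutorons-server | tutorons/regex/extract.py | _are_flags_valid
-- ===== SOURCE A (Python) =====
-- def _are_flags_valid(flags):
--
--     VALID_FLAGS = ['m', 'g', 'i', 'y']
--     seen_flags = []
--
--     # If any flags are repeated, then this was likely not written as a
--     # Javascript regular expression.
--     for f in flags:
--         if f in seen_flags or f not in VALID_FLAGS:
--             return False
--         seen_flags.append(f)
--     return True
-- ===== SOURCE B (Python) =====
-- def _are_flags_valid(flags):
--     s = set(flags)
--     return s <= {'m', 'g', 'i', 'y'} and len(s) == len(flags)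
-- ===== Notes on version B (the rewrite author's own statement) =====
-- stated objective: idiomatic
-- what changed: Replaces A's single short-circuiting scan with a seen-list accumulator by two aggregate set checks: subset of the valid-flag set and no duplicates via len(set(flags)) == len(flags).
import Mathlib
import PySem

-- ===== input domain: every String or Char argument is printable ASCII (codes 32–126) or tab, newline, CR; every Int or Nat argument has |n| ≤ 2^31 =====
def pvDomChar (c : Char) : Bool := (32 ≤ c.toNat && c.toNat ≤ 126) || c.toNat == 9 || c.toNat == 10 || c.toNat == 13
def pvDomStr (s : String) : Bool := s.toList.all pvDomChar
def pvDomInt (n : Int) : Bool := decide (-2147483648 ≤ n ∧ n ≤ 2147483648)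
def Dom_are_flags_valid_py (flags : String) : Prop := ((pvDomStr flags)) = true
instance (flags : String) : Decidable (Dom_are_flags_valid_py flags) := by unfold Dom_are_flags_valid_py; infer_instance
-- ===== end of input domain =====

-- B replaces A's short-circuiting scan with a seen-list accumulator by two aggregate
-- set checks (subset of the valid set, and no duplicates via len(set) == len): idiomatic.


-- ===== PORT A =====
-- the loop: for f in flags: if f in seen_flags or f not in VALID_FLAGS: return False; seen_flags.append(f)
def areFlagsValidLoop : List Char → List Char → Bool
  | [], _ => true
  | f :: rest, seen =>
      if seen.contains f || !(['m', 'g', 'i', 'y'].contains f) then false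
      else areFlagsValidLoop rest (seen ++ [f])

def are_flags_valid_py (flags : String) : Bool :=
  areFlagsValidLoop flags.toList []

-- ===== PORT B =====
-- s = set(flags); return s <= {'m','g','i','y'} and len(s) == len(flags)
def are_flags_valid_py_alt (flags : String) : Bool :=
  let s : PySem.Set Char := PySem.Set.ofList flags.toList
  PySem.Set.issubset s (PySem.Set.ofList ['m', 'g', 'i', 'y']) &&
    (PySem.Set.len s == PySem.Str.len flags)

-- ===== PRECONDITION & SPEC =====
def Spec_are_flags_valid_py (flags : String) (out : Bool) : Prop := out = are_flags_valid_py_alt flags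
instance (flags : String) (out : Bool) : Decidable (Spec_are_flags_valid_py flags out) := by unfold Spec_are_flags_valid_py; infer_instance

-- ===== CLAIM (what is proved, stated in full; the proofs are below) =====
def Claim_equal_are_flags_valid_py : Prop := ∀ (flags : String), Dom_are_flags_valid_py flags → Spec_are_flags_valid_py flags (are_flags_valid_py flags)

-- ===== LEMMAS AND PROOFS =====

-- A's loop returns true iff every flag is valid, unseen so far, and no flag repeats.
theorem areFlagsValidLoop_eq_true_iff (l : List Char) : ∀ (seen : List Char),
    areFlagsValidLoop l seen = true ↔
      (∀ f ∈ l, f ∈ (['m', 'g', 'i', 'y'] : List Char) ∧ f ∉ seen) ∧ l.Nodup := by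
  induction l with
  | nil => intro seen; simp [areFlagsValidLoop]
  | cons x rest ih =>
      intro seen
      simp only [areFlagsValidLoop]
      by_cases hx : seen.contains x || !(['m', 'g', 'i', 'y'].contains x)
      · rw [if_pos hx]
        simp only [Bool.or_eq_true, List.contains_eq_mem, decide_eq_true_eq,
          Bool.not_eq_true', decide_eq_false_iff_not] at hx
        simp only [Bool.false_eq_true, false_iff, not_and]
        intro h1 _
        have := h1 x (List.mem_cons_self ..)
        tauto
      · rw [if_neg hx, ih]
        simp only [Bool.or_eq_true, List.contains_eq_mem, decide_eq_true_eq,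
          Bool.not_eq_true', decide_eq_false_iff_not, not_or, not_not] at hx
        constructor
        · rintro ⟨h1, h2⟩
          refine ⟨?_, ?_⟩
          · intro f hf
            rcases List.mem_cons.mp hf with rfl | hf'
            · exact ⟨hx.2, hx.1⟩
            · have := h1 f hf'
              exact ⟨this.1, fun hs => this.2 (List.mem_append.mpr (Or.inl hs))⟩
          · rw [List.nodup_cons]
            refine ⟨fun hmem => ?_, h2⟩
            exact (h1 x hmem).2 (List.mem_append.mpr (Or.inr (List.mem_singleton.mpr rfl)))
        · rintro ⟨h1, h2⟩
          rw [List.nodup_cons] at h2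
          refine ⟨?_, h2.2⟩
          intro f hf
          have := h1 f (List.mem_cons.mpr (Or.inr hf))
          refine ⟨this.1, fun hmem => ?_⟩
          rcases List.mem_append.mp hmem with hs | hx1
          · exact this.2 hs
          · exact h2.1 (List.mem_singleton.mp hx1 ▸ hf)

-- length of foldl Set.add: bounded by s.length + l.length, equal iff l is fresh & duplicate-free
theorem foldl_add_length (l : List Char) : ∀ (s : List Char),
    (List.foldl PySem.Set.add s l).length ≤ s.length + l.length ∧
      ((List.foldl PySem.Set.add s l).length = s.length + l.length ↔
        (∀ x ∈ l, x ∉ s) ∧ l.Nodup) := by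
  induction l with
  | nil => intro s; simp
  | cons x rest ih =>
      intro s
      simp only [List.foldl_cons, List.length_cons]
      by_cases hx : x ∈ s
      · have hadd : PySem.Set.add s x = s := by
          simp [PySem.Set.add, PySem.Set.contains, List.contains_eq_mem, hx]
        rw [hadd]
        obtain ⟨hle, -⟩ := ih s
        refine ⟨by omega, ?_⟩
        constructor
        · intro h; omega
        · rintro ⟨h1, -⟩; exact absurd hx (h1 x (List.mem_cons_self ..))
      · have hadd : PySem.Set.add s x = s ++ [x] := by
          simp [PySem.Set.add, PySem.Set.contains, List.contains_eq_mem, hx]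
        rw [hadd]
        obtain ⟨hle, heq⟩ := ih (s ++ [x])
        simp only [List.length_append, List.length_singleton] at hle heq
        refine ⟨by omega, ?_⟩
        rw [show s.length + (rest.length + 1) = s.length + 1 + rest.length by omega, heq]
        constructor
        · rintro ⟨h1, h2⟩
          refine ⟨?_, ?_⟩
          · intro f hf
            rcases List.mem_cons.mp hf with rfl | hf'
            · exact hx
            · exact fun hs => h1 f hf' (List.mem_append.mpr (Or.inl hs))
          · rw [List.nodup_cons]
            exact ⟨fun hmem =>
              h1 x hmem (List.mem_append.mpr (Or.inr (List.mem_singleton.mpr rfl))), h2⟩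
        · rintro ⟨h1, h2⟩
          rw [List.nodup_cons] at h2
          refine ⟨?_, h2.2⟩
          intro f hf hmem
          rcases List.mem_append.mp hmem with hs | hx1
          · exact h1 f (List.mem_cons.mpr (Or.inr hf)) hs
          · exact h2.1 (List.mem_singleton.mp hx1 ▸ hf)

-- membership in a PySem set built from a list
theorem mem_ofList_iff (l : List Char) (x : Char) :
    x ∈ PySem.Set.ofList l ↔ x ∈ l := by
  rw [← PySem.List.dedup_eq_ofList]
  exact PySem.List.mem_dedup l x

-- ===== VERDICT (by name: the statement is the Claim_ definition above) =====
theorem are_flags_valid_py_spec : Claim_equal_are_flags_valid_py := by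
  intro flags _
  unfold Spec_are_flags_valid_py are_flags_valid_py are_flags_valid_py_alt
  set l := flags.toList with hl
  rw [Bool.eq_iff_iff, areFlagsValidLoop_eq_true_iff, Bool.and_eq_true]
  have hsub : PySem.Set.issubset (PySem.Set.ofList l) (PySem.Set.ofList ['m', 'g', 'i', 'y'])
      = true ↔ (∀ f ∈ l, f ∈ (['m', 'g', 'i', 'y'] : List Char)) := by
    simp only [PySem.Set.issubset, List.all_eq_true, PySem.Set.contains, List.contains_eq_mem,
      decide_eq_true_eq]
    constructor
    · intro h f hf
      exact (mem_ofList_iff _ f).mp (h f ((mem_ofList_iff l f).mpr hf))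
    · intro h f hf
      exact (mem_ofList_iff _ f).mpr (h f ((mem_ofList_iff l f).mp hf))
  have hlen2 : (PySem.Set.len (PySem.Set.ofList l) == PySem.Str.len flags) = true ↔
      l.Nodup := by
    have h1 : PySem.Str.len flags = (l.length : Int) := by simp [PySem.Str.len, hl]
    rw [h1]
    simp only [PySem.Set.len, PySem.Set.ofList, PySem.Set.empty, beq_iff_eq, Int.natCast_inj]
    have := (foldl_add_length l []).2
    simp only [List.length_nil, List.not_mem_nil, not_false_iff, zero_add] at this
    rw [this]
    simp
  rw [hsub, hlen2]
  simp [List.not_mem_nil]
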